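-- pv_equiv track=rewrite | github.com/mugon-dev/Coding-Test-Note | 카카오/2020인턴/휴대폰/python.py | solution
-- ===== SOURCE A (Python) =====
-- def solution(numbers, hand):
--     answer = ''
--     # 키패드를 배열(좌표)로 표현
--     keypad = {
--         1:(0,0),2:(0,1),3:(0,2),
--         4:(1,0),5:(1,1),6:(1,2),
--         7:(2,0),8:(2,1),9:(2,2),
--         "*":(3,0),0:(3,1),"#":(3,2)
--     }
--     # 왼쪽 오른쪽을 집합으로 정의
--     left, right = set([1,4,7]), set([3,6,9])
--     # 왼손, 오른손 위치 초기화
--     hand_L, hand_R = "*", "#"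
--     for num in numbers:
--         # 값을 넣을때 마다 왼손, 오른손 위치 지정
--         if num in left:
--             answer += "L"
--             hand_L = num
--         elif num in right:
--             answer += "R"
--             hand_R = num
--         else:
--             # 현재 손의 좌표에서 누를 번호의 좌표까지의 x,y 거리의 합
--             dist_L = abs(keypad[hand_L][0]-keypad[num][0])+abs(keypad[hand_L][1]-keypad[num][1])
--             dist_R = abs(keypad[hand_R][0]-keypad[num][0])+abs(keypad[hand_R][1]-keypad[num][1])
--             if dist_L == dist_R:
--                 if hand == "left":
--                     answer += "L"
--                     hand_L = num
--                 else:
--                     answer += "R"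
--                     hand_R = num
--             elif dist_L < dist_R:
--                 answer += "L"
--                 hand_L = num
--             else:
--                 answer += "R"
--                 hand_R = num
--     return answer
-- ===== SOURCE B (Python) =====
-- def _coord(num):
--     return (3, 1) if num == 0 else ((num - 1) // 3, (num - 1) % 3)
--
--
-- def solution(numbers, hand):
--     # No hand-position variables: the state is the decision history itself
--     # (most recent first); each hand's position is recovered by scanning it.
--     done = []  # list of (num, ch) pairs, most recent press first
--     for num in numbers:
--         r, c = _coord(num)
--         if c == 0:
--             ch = 'L'
--         elif c == 2:
--             ch = 'R'
--         else:
--             pL = next((_coord(n) for n, d in done if d == 'L'), (3, 0))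
--             pR = next((_coord(n) for n, d in done if d == 'R'), (3, 2))
--             dL = abs(pL[0] - r) + abs(pL[1] - c)
--             dR = abs(pR[0] - r) + abs(pR[1] - c)
--             ch = 'L' if dL < dR or (dL == dR and hand == 'left') else 'R'
--         done = [(num, ch)] + done
--     return ''.join(ch for _, ch in reversed(done))
-- ===== Notes on version B (the rewrite author's own statement) =====
-- stated objective: alternative
-- what changed: B keeps no hand-position variables or left/right sets: its only state is the decision history (a prepend-only list of (number, hand-letter) pairs); each hand's current position is recovered by scanning that history for the hand's last press (with coordinates computed arithmetically as ((num-1)//3,(num-1)%3)), and the answer is produced at the end by reversing the history.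
import Mathlib
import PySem

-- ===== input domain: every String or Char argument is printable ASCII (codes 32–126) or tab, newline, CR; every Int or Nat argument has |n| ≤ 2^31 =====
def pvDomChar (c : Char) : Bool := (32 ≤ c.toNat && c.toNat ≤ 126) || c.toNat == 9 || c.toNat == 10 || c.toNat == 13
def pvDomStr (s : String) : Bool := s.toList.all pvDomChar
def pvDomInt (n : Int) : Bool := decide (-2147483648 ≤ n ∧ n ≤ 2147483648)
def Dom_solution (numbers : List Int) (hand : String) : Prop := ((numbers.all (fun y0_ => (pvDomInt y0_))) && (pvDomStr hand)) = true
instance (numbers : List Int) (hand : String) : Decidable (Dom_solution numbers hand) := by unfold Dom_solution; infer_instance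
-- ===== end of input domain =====

-- B keeps no hand positions or answer accumulator: its state is the full decision history,
-- from which each hand's position is recovered by a backward scan (alternative structure, same result).

-- ===== PORT A =====
-- In A, hand_L/hand_R hold either a pressed digit or the initial "*" / "#" string; PKey models that union.
inductive PKey
  | star : PKey
  | hash : PKey
  | num : Int → PKey
deriving DecidableEq, Repr

-- A's keypad dict as a lookup function; none = key absent (Python KeyError, excluded by Pre_solution)
def keypadA : PKey → Option (Int × Int)
  | .star => some (3, 0)
  | .hash => some (3, 2)
  | .num n =>
    if n = 1 then some (0, 0) else if n = 2 then some (0, 1) else if n = 3 then some (0, 2)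
    else if n = 4 then some (1, 0) else if n = 5 then some (1, 1) else if n = 6 then some (1, 2)
    else if n = 7 then some (2, 0) else if n = 8 then some (2, 1) else if n = 9 then some (2, 2)
    else if n = 0 then some (3, 1) else none

-- loop body of A; the `.getD (0, 0)` is reached only where Python raises KeyError (outside Pre_solution)
def stepA (hand : String) (st : String × PKey × PKey) (num : Int) : String × PKey × PKey :=
  let (answer, hL, hR) := st
  if PySem.Set.contains (PySem.Set.ofList [1, 4, 7]) num then
    (answer ++ "L", PKey.num num, hR)
  else if PySem.Set.contains (PySem.Set.ofList [3, 6, 9]) num then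
    (answer ++ "R", hL, PKey.num num)
  else
    let pL := (keypadA hL).getD (0, 0)
    let pR := (keypadA hR).getD (0, 0)
    let pN := (keypadA (.num num)).getD (0, 0)
    let distL := |pL.1 - pN.1| + |pL.2 - pN.2|
    let distR := |pR.1 - pN.1| + |pR.2 - pN.2|
    if distL = distR then
      if hand = "left" then (answer ++ "L", PKey.num num, hR)
      else (answer ++ "R", hL, PKey.num num)
    else if distL < distR then (answer ++ "L", PKey.num num, hR)
    else (answer ++ "R", hL, PKey.num num)

def solution (numbers : List Int) (hand : String) : String :=
  (numbers.foldl (stepA hand) ("", PKey.star, PKey.hash)).1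

-- ===== PORT B =====
-- digit -> (row, col) by arithmetic (B's `(3,1) if num == 0 else ((num-1)//3, (num-1)%3)`)
def coordB (num : Int) : Int × Int :=
  if num = 0 then (3, 1) else (PySem.Int.floordiv (num - 1) 3, PySem.Int.mod (num - 1) 3)

-- B's `next((_coord(n) for n, d in done if d == ch), default)` : first match in the history
def findPosB (ch : Char) (default : Int × Int) : List (Int × Char) → Int × Int
  | [] => default
  | (n, d) :: t => if d = ch then coordB n else findPosB ch default t

-- loop body of B: prepend this press's decision to the history
def stepB (hand : String) (done : List (Int × Char)) (num : Int) : List (Int × Char) :=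
  let rc := coordB num
  let ch :=
    if rc.2 = 0 then 'L'
    else if rc.2 = 2 then 'R'
    else
      let pL := findPosB 'L' (3, 0) done
      let pR := findPosB 'R' (3, 2) done
      let dL := |pL.1 - rc.1| + |pL.2 - rc.2|
      let dR := |pR.1 - rc.1| + |pR.2 - rc.2|
      if dL < dR ∨ (dL = dR ∧ hand = "left") then 'L' else 'R'
  (num, ch) :: done

def solution_alt (numbers : List Int) (hand : String) : String :=
  String.ofList (((numbers.foldl (stepB hand) []).map Prod.snd).reverse)

-- ===== PRECONDITION & SPEC =====
-- A raises KeyError on any entry outside 0..9 (such an entry falls to the else branch and is looked up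
-- in the keypad dict, where it is absent); Pre_ excludes exactly those inputs.
def Pre_solution (numbers : List Int) (hand : String) : Prop :=
  ∀ n ∈ numbers, 0 ≤ n ∧ n ≤ 9

instance (numbers : List Int) (hand : String) : Decidable (Pre_solution numbers hand) := by
  unfold Pre_solution; infer_instance

def pvWitness_solution : List Int × String := ([1, 3, 4, 5, 8, 2, 1, 4, 5, 9, 5], "right")

def Spec_solution (numbers : List Int) (hand : String) (out : String) : Prop := out = solution_alt numbers hand
instance (numbers : List Int) (hand : String) (out : String) : Decidable (Spec_solution numbers hand out) := by unfold Spec_solution; infer_instance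

-- ===== CLAIM (what is proved, stated in full; the proofs are below) =====
def Claim_equal_solution : Prop := ∀ (numbers : List Int) (hand : String), Dom_solution numbers hand → Pre_solution numbers hand → Spec_solution numbers hand (solution numbers hand)

-- ===== LEMMAS AND PROOFS =====

-- invariant relating A's loop state to B's history: same answer so far, and the keypad position of
-- each of A's hand keys is exactly what B's backward scan of the history recovers
def relState (a : String × PKey × PKey) (done : List (Int × Char)) : Prop :=
  a.1 = String.ofList ((done.map Prod.snd).reverse) ∧
  keypadA a.2.1 = some (findPosB 'L' (3, 0) done) ∧
  keypadA a.2.2 = some (findPosB 'R' (3, 2) done)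

lemma ansL (l : List Char) : String.ofList l ++ "L" = String.ofList (l ++ ['L']) := by
  apply String.ext; simp

lemma ansR (l : List Char) : String.ofList l ++ "R" = String.ofList (l ++ ['R']) := by
  apply String.ext; simp

lemma findPosB_cons_same (ch : Char) (d : Int × Int) (n : Int) (t : List (Int × Char)) :
    findPosB ch d ((n, ch) :: t) = coordB n := by
  simp [findPosB]

lemma findPosB_cons_other (ch ch' : Char) (hne : ch' ≠ ch) (d : Int × Int) (n : Int)
    (t : List (Int × Char)) : findPosB ch d ((n, ch') :: t) = findPosB ch d t := by
  simp [findPosB, hne]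

-- the new history (n, 'L') :: done re-establishes the invariant for an L press
lemma rel_pushL (a1 : String) (hR : PKey) (done : List (Int × Char)) (n : Int)
    (h1 : a1 = String.ofList ((done.map Prod.snd).reverse))
    (h3 : keypadA hR = some (findPosB 'R' (3, 2) done))
    (hk : keypadA (.num n) = some (coordB n)) :
    relState (a1 ++ "L", PKey.num n, hR) ((n, 'L') :: done) := by
  refine ⟨?_, ?_, ?_⟩
  · simp only [List.map_cons, List.reverse_cons, h1]; exact ansL _
  · rw [findPosB_cons_same]; exact hk
  · rw [findPosB_cons_other 'R' 'L' (by decide)]; exact h3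

lemma rel_pushR (a1 : String) (hL : PKey) (done : List (Int × Char)) (n : Int)
    (h1 : a1 = String.ofList ((done.map Prod.snd).reverse))
    (h2 : keypadA hL = some (findPosB 'L' (3, 0) done))
    (hk : keypadA (.num n) = some (coordB n)) :
    relState (a1 ++ "R", hL, PKey.num n) ((n, 'R') :: done) := by
  refine ⟨?_, ?_, ?_⟩
  · simp only [List.map_cons, List.reverse_cons, h1]; exact ansR _
  · rw [findPosB_cons_other 'L' 'R' (by decide)]; exact h2
  · rw [findPosB_cons_same]; exact hk

-- A's equality/less-than if-chain equals B's single disjunctive condition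
lemma branch_eq {α : Type} (dL dR : Int) (hand : String) (X Y : α) :
    (if dL = dR then (if hand = "left" then X else Y) else if dL < dR then X else Y)
    = (if dL < dR ∨ (dL = dR ∧ hand = "left") then X else Y) := by
  by_cases he : dL = dR
  · subst he; simp
  · by_cases hlt : dL < dR
    · simp [he, hlt]
    · simp [he, hlt]

lemma step_left (hand : String) (n : Int) (a1 : String) (hL hR : PKey)
    (done : List (Int × Char)) (h : relState (a1, hL, hR) done)
    (hm : PySem.Set.contains (PySem.Set.ofList [1, 4, 7]) n = true)
    (hk : keypadA (.num n) = some (coordB n)) (hc : (coordB n).2 = 0) :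
    relState (stepA hand (a1, hL, hR) n) (stepB hand done n) := by
  obtain ⟨h1, h2, h3⟩ := h
  have h1' : a1 = String.ofList ((done.map Prod.snd).reverse) := h1
  have h3' : keypadA hR = some (findPosB 'R' (3, 2) done) := h3
  have hA : stepA hand (a1, hL, hR) n = (a1 ++ "L", PKey.num n, hR) := by
    simp only [stepA, hm, if_true]
  have hB : stepB hand done n = (n, 'L') :: done := by
    simp only [stepB]
    rw [if_pos hc]
  rw [hA, hB]
  exact rel_pushL a1 hR done n h1' h3' hk

lemma step_right (hand : String) (n : Int) (a1 : String) (hL hR : PKey)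
    (done : List (Int × Char)) (h : relState (a1, hL, hR) done)
    (hml : PySem.Set.contains (PySem.Set.ofList [1, 4, 7]) n = false)
    (hmr : PySem.Set.contains (PySem.Set.ofList [3, 6, 9]) n = true)
    (hk : keypadA (.num n) = some (coordB n)) (hc : (coordB n).2 = 2) :
    relState (stepA hand (a1, hL, hR) n) (stepB hand done n) := by
  obtain ⟨h1, h2, h3⟩ := h
  have h1' : a1 = String.ofList ((done.map Prod.snd).reverse) := h1
  have h2' : keypadA hL = some (findPosB 'L' (3, 0) done) := h2
  have hA : stepA hand (a1, hL, hR) n = (a1 ++ "R", hL, PKey.num n) := by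
    simp only [stepA, hml, hmr, Bool.false_eq_true, if_false, if_true]
  have hB : stepB hand done n = (n, 'R') :: done := by
    simp only [stepB]
    rw [if_neg (by simp [hc] : ¬ ((coordB n).2 = 0)), if_pos hc]
  rw [hA, hB]
  exact rel_pushR a1 hL done n h1' h2' hk

lemma step_mid (hand : String) (n : Int) (a1 : String) (hL hR : PKey)
    (done : List (Int × Char)) (h : relState (a1, hL, hR) done)
    (hml : PySem.Set.contains (PySem.Set.ofList [1, 4, 7]) n = false)
    (hmr : PySem.Set.contains (PySem.Set.ofList [3, 6, 9]) n = false)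
    (hk : keypadA (.num n) = some (coordB n)) (hc : (coordB n).2 = 1) :
    relState (stepA hand (a1, hL, hR) n) (stepB hand done n) := by
  obtain ⟨h1, h2, h3⟩ := h
  have h1' : a1 = String.ofList ((done.map Prod.snd).reverse) := h1
  have h2' : keypadA hL = some (findPosB 'L' (3, 0) done) := h2
  have h3' : keypadA hR = some (findPosB 'R' (3, 2) done) := h3
  have hA : stepA hand (a1, hL, hR) n =
      (if |(findPosB 'L' (3, 0) done).1 - (coordB n).1| + |(findPosB 'L' (3, 0) done).2 - (coordB n).2|
            < |(findPosB 'R' (3, 2) done).1 - (coordB n).1| + |(findPosB 'R' (3, 2) done).2 - (coordB n).2|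
          ∨ (|(findPosB 'L' (3, 0) done).1 - (coordB n).1| + |(findPosB 'L' (3, 0) done).2 - (coordB n).2|
              = |(findPosB 'R' (3, 2) done).1 - (coordB n).1| + |(findPosB 'R' (3, 2) done).2 - (coordB n).2|
            ∧ hand = "left")
        then (a1 ++ "L", PKey.num n, hR) else (a1 ++ "R", hL, PKey.num n)) := by
    simp only [stepA, hml, hmr, Bool.false_eq_true, if_false, h2', h3', hk, Option.getD_some]
    exact branch_eq _ _ hand _ _
  have hB : stepB hand done n =
      ((n, if |(findPosB 'L' (3, 0) done).1 - (coordB n).1| + |(findPosB 'L' (3, 0) done).2 - (coordB n).2|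
            < |(findPosB 'R' (3, 2) done).1 - (coordB n).1| + |(findPosB 'R' (3, 2) done).2 - (coordB n).2|
          ∨ (|(findPosB 'L' (3, 0) done).1 - (coordB n).1| + |(findPosB 'L' (3, 0) done).2 - (coordB n).2|
              = |(findPosB 'R' (3, 2) done).1 - (coordB n).1| + |(findPosB 'R' (3, 2) done).2 - (coordB n).2|
            ∧ hand = "left")
        then 'L' else 'R') :: done) := by
    simp only [stepB]
    rw [if_neg (by simp [hc] : ¬ ((coordB n).2 = 0)), if_neg (by simp [hc] : ¬ ((coordB n).2 = 2))]
  rw [hA, hB]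
  split_ifs with hcond
  · exact rel_pushL a1 hR done n h1' h3' hk
  · exact rel_pushR a1 hL done n h1' h2' hk

lemma step_rel (hand : String) (n : Int) (hn : 0 ≤ n ∧ n ≤ 9)
    (a : String × PKey × PKey) (done : List (Int × Char))
    (h : relState a done) : relState (stepA hand a n) (stepB hand done n) := by
  obtain ⟨a1, a2, a3⟩ := a
  obtain ⟨hlo, hhi⟩ := hn
  interval_cases n
  · exact step_mid hand 0 a1 a2 a3 done h (by decide) (by decide) (by decide) (by decide)
  · exact step_left hand 1 a1 a2 a3 done h (by decide) (by decide) (by decide)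
  · exact step_mid hand 2 a1 a2 a3 done h (by decide) (by decide) (by decide) (by decide)
  · exact step_right hand 3 a1 a2 a3 done h (by decide) (by decide) (by decide) (by decide)
  · exact step_left hand 4 a1 a2 a3 done h (by decide) (by decide) (by decide)
  · exact step_mid hand 5 a1 a2 a3 done h (by decide) (by decide) (by decide) (by decide)
  · exact step_right hand 6 a1 a2 a3 done h (by decide) (by decide) (by decide) (by decide)
  · exact step_left hand 7 a1 a2 a3 done h (by decide) (by decide) (by decide)
  · exact step_mid hand 8 a1 a2 a3 done h (by decide) (by decide) (by decide) (by decide)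
  · exact step_right hand 9 a1 a2 a3 done h (by decide) (by decide) (by decide) (by decide)

lemma fold_rel (hand : String) (l : List Int) (hl : ∀ n ∈ l, 0 ≤ n ∧ n ≤ 9) :
    ∀ (a : String × PKey × PKey) (done : List (Int × Char)),
      relState a done → relState (l.foldl (stepA hand) a) (l.foldl (stepB hand) done) := by
  induction l with
  | nil => intro a d h; simpa using h
  | cons n t ih =>
    intro a d h
    simp only [List.foldl_cons]
    exact ih (fun m hm => hl m (List.mem_cons_of_mem _ hm))
      _ _ (step_rel hand n (hl n (List.mem_cons_self ..)) a d h)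

-- ===== VERDICT (by name: the statement is the Claim_ definition above) =====
theorem solution_spec : Claim_equal_solution := by
  intro numbers hand _ hpre
  unfold Spec_solution solution solution_alt
  exact (fold_rel hand numbers hpre ("", PKey.star, PKey.hash) []
    ⟨rfl, by decide, by decide⟩).1
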